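-- pv_equiv track=rewrite | github.com/zackorndorff/adventofcode | 12.py | matches_summary
-- ===== SOURCE A (Python) =====
-- def matches_summary(records, summary):
--     in_run = False
--     run_length = 0
--     run_lengths = []
--     for ch in records:
--         if ch == "#" and in_run:
--             run_length += 1
--         elif ch == "#" and not in_run:
--             run_length = 1
--             in_run = True
--         elif ch == "." and in_run:
--             run_lengths.append(run_length)
--             in_run = False
--             run_length = 0
--     if run_length:
--         run_lengths.append(run_length)
--     return tuple(run_lengths) == summary, run_lengths
-- ===== SOURCE B (Python) =====
-- def matches_summary(records, summary):
--     run_lengths = [c for c in (seg.count("#") for seg in records.split(".")) if c]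
--     return tuple(run_lengths) == summary, run_lengths
-- ===== Notes on version B (the rewrite author's own statement) =====
-- stated objective: idiomatic
-- what changed: Replaced the character-by-character in_run/run_length state machine with a declarative split-based pass: split on '.', count '#' per segment, keep the positive counts (C-level str.split/str.count instead of a Python-level loop).
import Mathlib
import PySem

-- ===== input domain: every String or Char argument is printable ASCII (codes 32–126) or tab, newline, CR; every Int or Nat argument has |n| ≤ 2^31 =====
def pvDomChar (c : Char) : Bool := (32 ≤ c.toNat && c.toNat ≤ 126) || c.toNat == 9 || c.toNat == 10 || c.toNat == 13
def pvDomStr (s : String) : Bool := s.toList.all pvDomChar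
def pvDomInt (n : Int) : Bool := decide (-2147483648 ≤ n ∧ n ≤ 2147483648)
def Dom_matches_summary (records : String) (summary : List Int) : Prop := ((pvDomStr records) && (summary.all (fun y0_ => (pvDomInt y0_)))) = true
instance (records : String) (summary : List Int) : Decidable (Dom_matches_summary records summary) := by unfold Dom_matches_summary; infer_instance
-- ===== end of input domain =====

-- B replaces A's in_run/run_length character state machine by a split-on-'.' pass
-- counting '#' per segment (idiomatic; return value only, no side effects involved).

-- ===== PORT A =====
-- one step of A's for-loop over the characters, with state (in_run, run_length, run_lengths)
def msA_step (st : Bool × Int × List Int) (ch : Char) : Bool × Int × List Int :=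
  if ch == '#' && st.1 then (st.1, st.2.1 + 1, st.2.2)
  else if ch == '#' && !st.1 then (true, (1 : Int), st.2.2)
  else if ch == '.' && st.1 then (false, (0 : Int), st.2.2 ++ [st.2.1])
  else st

def matches_summary (records : String) (summary : List Int) : Bool × List Int :=
  let st := records.toList.foldl msA_step (false, (0 : Int), ([] : List Int))
  -- 'if run_length:' — Python truthiness of an int
  let run_lengths := if st.2.1 ≠ 0 then st.2.2 ++ [st.2.1] else st.2.2
  (decide (run_lengths = summary), run_lengths)

-- ===== PORT B =====
-- Source B: run_lengths = [c for c in (seg.count("#") for seg in records.split(".")) if c]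
def matches_summary_alt (records : String) (summary : List Int) : Bool × List Int :=
  let segs := PySem.Chars.splitOn records.toList ['.']
  let run_lengths := (segs.map (fun seg => ((PySem.Chars.count seg ['#'] : Nat) : Int))).filter
      (fun c => !(c == 0))
  (decide (run_lengths = summary), run_lengths)

-- ===== PRECONDITION & SPEC =====
def Spec_matches_summary (records : String) (summary : List Int) (out : Bool × List Int) : Prop := out = matches_summary_alt records summary
instance (records : String) (summary : List Int) (out : Bool × List Int) : Decidable (Spec_matches_summary records summary out) := by unfold Spec_matches_summary; infer_instance

-- ===== CLAIM (what is proved, stated in full; the proofs are below) =====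
def Claim_equal_matches_summary : Prop := ∀ (records : String) (summary : List Int), Dom_matches_summary records summary → Spec_matches_summary records summary (matches_summary records summary)

-- ===== LEMMAS AND PROOFS =====

-- simple structural model of records.split('.')
def splitDot : List Char → List (List Char)
  | [] => [[]]
  | c :: rest =>
    if c = '.' then [] :: splitDot rest
    else
      match splitDot rest with
      | s :: ss => (c :: s) :: ss
      | [] => [[c]]

lemma splitDot_ne_nil (l : List Char) : splitDot l ≠ [] := by
  cases l with
  | nil => simp [splitDot]
  | cons c rest =>
    simp only [splitDot]
    split
    · simp
    · rcases h : splitDot rest with _ | ⟨s, ss⟩ <;> simp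

-- curried head-prepend used to state the accumulator invariant of splitOn.go
def consHd (x : List Char) : List (List Char) → List (List Char)
  | s :: ss => (x ++ s) :: ss
  | [] => [x]

lemma splitOn_go_dot (fuel : Nat) : ∀ (l cur : List Char) (acc : List (List Char)),
    l.length ≤ fuel →
    PySem.Chars.splitOn.go ['.'] fuel l cur acc = acc.reverse ++ consHd cur.reverse (splitDot l) := by
  induction fuel with
  | zero =>
    intro l cur acc h
    have : l = [] := List.length_eq_zero_iff.mp (Nat.le_zero.mp h)
    subst this
    simp [PySem.Chars.splitOn.go, splitDot, consHd]
  | succ f ih =>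
    intro l cur acc h
    cases l with
    | nil => simp [PySem.Chars.splitOn.go, splitDot, consHd]
    | cons c rest =>
      simp only [PySem.Chars.splitOn.go]
      by_cases hc : c = '.'
      · subst hc
        simp only [List.isPrefixOf, beq_self_eq_true, Bool.true_and, if_true, List.length_cons, List.drop_succ_cons, List.length_nil, List.drop_zero]
        rw [ih rest [] ((cur.reverse) :: acc) (by simpa using Nat.le_of_succ_le_succ h)]
        rcases hs : splitDot rest with _ | ⟨s, ss⟩
        · exact absurd hs (splitDot_ne_nil rest)
        · simp [splitDot, hs, consHd]
      · have hpre : List.isPrefixOf ['.'] (c :: rest) = false := by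
          simp [List.isPrefixOf]
          intro hcontra; exact hc hcontra.symm
        simp only [hpre, Bool.false_eq_true, if_false]
        rw [ih rest (c :: cur) acc (by simpa using Nat.le_of_succ_le_succ h)]
        rcases hs : splitDot rest with _ | ⟨s, ss⟩
        · exact absurd hs (splitDot_ne_nil rest)
        · simp [splitDot, hs, consHd, hc]

lemma splitOn_dot (l : List Char) : PySem.Chars.splitOn l ['.'] = splitDot l := by
  unfold PySem.Chars.splitOn
  rw [splitOn_go_dot (l.length + 1) l [] [] (Nat.le_succ _)]
  rcases hs : splitDot l with _ | ⟨s, ss⟩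
  · exact absurd hs (splitDot_ne_nil l)
  · simp [consHd]

lemma count_go_hash (fuel : Nat) : ∀ (l : List Char) (acc : Nat),
    l.length ≤ fuel →
    PySem.Chars.count.go ['#'] fuel l acc = acc + l.count '#' := by
  induction fuel with
  | zero =>
    intro l acc h
    have : l = [] := List.length_eq_zero_iff.mp (Nat.le_zero.mp h)
    subst this
    simp [PySem.Chars.count.go]
  | succ f ih =>
    intro l acc h
    cases l with
    | nil => simp [PySem.Chars.count.go]
    | cons c rest =>
      simp only [PySem.Chars.count.go]
      by_cases hc : c = '#'
      · subst hc
        simp only [List.isPrefixOf, beq_self_eq_true, Bool.true_and, if_true, List.length_cons, List.drop_succ_cons, List.length_nil, List.drop_zero]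
        rw [ih rest (acc + 1) (by simpa using Nat.le_of_succ_le_succ h)]
        simp
        omega
      · have hpre : List.isPrefixOf ['#'] (c :: rest) = false := by
          simp [List.isPrefixOf]
          intro hcontra; exact hc hcontra.symm
        simp only [hpre, Bool.false_eq_true, if_false]
        rw [ih rest acc (by simpa using Nat.le_of_succ_le_succ h)]
        simp [hc]

lemma count_hash (l : List Char) : PySem.Chars.count l ['#'] = l.count '#' := by
  unfold PySem.Chars.count
  simp only [List.isEmpty_cons, Bool.false_eq_true, if_false]
  simpa using count_go_hash l.length l 0 (Nat.le_refl _)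

-- the per-segment '#'-counts of B, as Ints
def cnts (l : List Char) : List Int := (splitDot l).map (fun s => ((s.count '#' : Nat) : Int))

lemma cnts_ne_nil (l : List Char) : cnts l ≠ [] := by
  simp [cnts, splitDot_ne_nil]

def addHd (rl : Int) : List Int → List Int
  | c :: cs => (rl + c) :: cs
  | [] => [rl]

-- loop invariant: folding A's step from a state whose pending run has length rl ≥ 0
-- produces acc followed by the nonzero counts, the first segment count raised by rl
lemma foldA_inv (l : List Char) : ∀ (rl : Int) (acc : List Int), 0 ≤ rl →
    (let st := l.foldl msA_step (decide (rl ≠ 0), rl, acc)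
     if st.2.1 ≠ 0 then st.2.2 ++ [st.2.1] else st.2.2) =
      acc ++ (addHd rl (cnts l)).filter (fun c => !(c == 0)) := by
  induction l with
  | nil =>
    intro rl acc _
    rcases hs : cnts [] with _ | ⟨c, cs⟩
    · exact absurd hs (cnts_ne_nil [])
    · simp [cnts, splitDot] at hs
      obtain ⟨hc, hcs⟩ := hs
      subst hc; subst hcs
      simp only [List.foldl_nil, addHd]
      by_cases h0 : rl = 0
      · subst h0; simp [List.filter]
      · have hb : (rl == 0) = false := by simp [h0]
        simp [List.filter, hb]
        exact h0
  | cons ch rest ih =>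
    intro rl acc hrl
    rcases hs : splitDot rest with _ | ⟨s, ss⟩
    · exact absurd hs (splitDot_ne_nil rest)
    by_cases hH : ch = '#'
    · subst hH
      have hstep : msA_step (decide (rl ≠ 0), rl, acc) '#' = (decide ((rl + 1) ≠ 0), rl + 1, acc) := by
        by_cases h0 : rl = 0
        · subst h0; simp [msA_step]
        · simp [msA_step, h0]
          omega
      rw [List.foldl_cons, hstep, ih (rl + 1) acc (by omega)]
      have : cnts ('#' :: rest) = (1 + ((s.count '#' : Nat) : Int)) :: ss.map (fun t => ((t.count '#' : Nat) : Int)) := by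
        simp [cnts, splitDot, hs]
        ring
      rw [this]
      have : cnts rest = ((s.count '#' : Nat) : Int) :: ss.map (fun t => ((t.count '#' : Nat) : Int)) := by
        simp [cnts, hs]
      rw [this]
      simp only [addHd]
      ring_nf
    · by_cases hD : ch = '.'
      · subst hD
        have hcr : cnts ('.' :: rest) = (0 : Int) :: cnts rest := by
          simp [cnts, splitDot]
        by_cases h0 : rl = 0
        · subst h0
          have hstep : msA_step (decide ((0:Int) ≠ 0), 0, acc) '.' = (decide ((0:Int) ≠ 0), 0, acc) := by
            simp [msA_step]
          rw [List.foldl_cons, hstep, ih 0 acc le_rfl]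
          rw [hcr]
          rcases hc : cnts rest with _ | ⟨c, cs⟩
          · exact absurd hc (cnts_ne_nil rest)
          · simp [addHd, List.filter]
        · have hstep : msA_step (decide (rl ≠ 0), rl, acc) '.' = (decide ((0:Int) ≠ 0), 0, acc ++ [rl]) := by
            simp [msA_step, h0]
          rw [List.foldl_cons, hstep, ih 0 (acc ++ [rl]) le_rfl]
          rw [hcr]
          rcases hc : cnts rest with _ | ⟨c, cs⟩
          · exact absurd hc (cnts_ne_nil rest)
          · simp [addHd, List.filter, h0]
      · have hstep : msA_step (decide (rl ≠ 0), rl, acc) ch = (decide (rl ≠ 0), rl, acc) := by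
          simp [msA_step, hH, hD]
        rw [List.foldl_cons, hstep, ih rl acc hrl]
        have : cnts (ch :: rest) = cnts rest := by
          simp [cnts, splitDot, hD, hs, hH]
        rw [this]

lemma run_lengths_eq (l : List Char) :
    (if (l.foldl msA_step (false, (0 : Int), ([] : List Int))).2.1 ≠ 0 then
        (l.foldl msA_step (false, (0 : Int), ([] : List Int))).2.2 ++
          [(l.foldl msA_step (false, (0 : Int), ([] : List Int))).2.1]
      else (l.foldl msA_step (false, (0 : Int), ([] : List Int))).2.2) =
      ((PySem.Chars.splitOn l ['.']).map (fun seg => ((PySem.Chars.count seg ['#'] : Nat) : Int))).filter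
        (fun c => !(c == 0)) := by
  have hB : (PySem.Chars.splitOn l ['.']).map (fun seg => ((PySem.Chars.count seg ['#'] : Nat) : Int)) = cnts l := by
    rw [splitOn_dot]; simp only [cnts]; congr 1; funext seg; rw [count_hash]
  rw [hB]
  have h := foldA_inv l 0 [] le_rfl
  simp only [ne_eq, not_true_eq_false, decide_false] at h
  rw [h]
  rcases hc : cnts l with _ | ⟨c, cs⟩
  · exact absurd hc (cnts_ne_nil l)
  · simp [addHd]

-- ===== VERDICT (by name: the statement is the Claim_ definition above) =====
theorem matches_summary_spec : Claim_equal_matches_summary := by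
  intro records summary _
  unfold Spec_matches_summary matches_summary matches_summary_alt
  simp only [run_lengths_eq records.toList]
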